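-- pv_equiv track=rewrite | github.com/aithaprasad/NLP_Sentiment_Analysis | utility.py | get_unique_count
-- ===== SOURCE A (Python) =====
-- def get_unique_count(pos, neg):
--     seen_keys = {}
--     uniques = 0
--
--     for key in pos.keys():
--         if key not in seen_keys.keys():
--             seen_keys[key] = 1
--
--     for key in neg.keys():
--         if key not in seen_keys.keys():
--             seen_keys[key] = 1
--
--     return len(seen_keys.keys())
-- ===== SOURCE B (Python) =====
-- def get_unique_count(pos, neg):
--     # sort all keys together; the number of distinct keys is
--     # 1 + number of adjacent unequal pairs in the sorted list
--     keys = sorted(list(pos) + list(neg))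
--     if not keys:
--         return 0
--     count = 1
--     prev = keys[0]
--     for cur in keys[1:]:
--         if cur != prev:
--             count += 1
--         prev = cur
--     return count
-- ===== Notes on version B (the rewrite author's own statement) =====
-- stated objective: alternative
-- what changed: Replaces A's hash-based dedup (two loops populating a seen_keys dict with membership tests) by sort-then-scan: sort all keys of both dicts together and count the boundaries between unequal adjacent elements; no set/dict and no membership test is used.
import Mathlib
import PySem

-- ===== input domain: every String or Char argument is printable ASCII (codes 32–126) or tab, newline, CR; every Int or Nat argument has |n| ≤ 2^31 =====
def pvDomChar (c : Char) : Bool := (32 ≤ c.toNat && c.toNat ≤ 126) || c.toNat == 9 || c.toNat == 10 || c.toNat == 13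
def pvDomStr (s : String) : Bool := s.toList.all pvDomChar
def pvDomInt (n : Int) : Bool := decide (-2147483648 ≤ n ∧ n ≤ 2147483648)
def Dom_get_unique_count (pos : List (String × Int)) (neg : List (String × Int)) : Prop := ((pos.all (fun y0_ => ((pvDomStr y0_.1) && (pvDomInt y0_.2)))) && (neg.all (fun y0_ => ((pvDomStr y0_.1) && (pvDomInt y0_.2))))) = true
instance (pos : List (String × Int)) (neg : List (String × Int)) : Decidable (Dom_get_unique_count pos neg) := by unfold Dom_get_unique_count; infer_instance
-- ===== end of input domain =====

-- B replaces A's hash-based dedup (a seen_keys dict filled by two membership-test loops) by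
-- sort-then-scan: sort all keys together and count boundaries between unequal neighbours.

-- ===== PORT A =====
-- the body of A's two (identical) 'if key not in seen_keys: seen_keys[key] = 1' loops
def pvStep (seen : PySem.Dict String Int) (kv : String × Int) : PySem.Dict String Int :=
  if seen.contains kv.1 then seen else seen.insert kv.1 1

def get_unique_count (pos : List (String × Int)) (neg : List (String × Int)) : Int :=
  let seen0 : PySem.Dict String Int := PySem.Dict.empty
  let seen1 := pos.foldl pvStep seen0
  let seen2 := neg.foldl pvStep seen1
  (seen2.keys.length : Int)

-- ===== PORT B =====
-- the 'for cur in keys[1:]' loop of Source B, carrying prev and the accumulated increments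
def pvCountRuns (prev : String) : List String → Int
  | [] => 0
  | cur :: rest => (if cur ≠ prev then 1 else 0) + pvCountRuns cur rest

def get_unique_count_alt (pos : List (String × Int)) (neg : List (String × Int)) : Int :=
  let keys := PySem.List.sorted (pos.map Prod.fst ++ neg.map Prod.fst) (fun x => x) false
  match keys with
  | [] => 0
  | x :: rest => 1 + pvCountRuns x rest

-- ===== PRECONDITION & SPEC =====
def Spec_get_unique_count (pos : List (String × Int)) (neg : List (String × Int)) (out : Int) : Prop := out = get_unique_count_alt pos neg
instance (pos : List (String × Int)) (neg : List (String × Int)) (out : Int) : Decidable (Spec_get_unique_count pos neg out) := by unfold Spec_get_unique_count; infer_instance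

-- ===== CLAIM (what is proved, stated in full; the proofs are below) =====
def Claim_equal_get_unique_count : Prop := ∀ (pos : List (String × Int)) (neg : List (String × Int)), Dom_get_unique_count pos neg → Spec_get_unique_count pos neg (get_unique_count pos neg)

-- ===== LEMMAS AND PROOFS =====

-- A's conditional-insert loop grows the key list like a set update.
theorem keys_condLoop (l : List (String × Int)) (d : PySem.Dict String Int) :
    (l.foldl pvStep d).keys = PySem.Set.update d.keys (l.map Prod.fst) := by
  induction l generalizing d with
  | nil => simp [PySem.Set.update_nil]
  | cons kv rest ih =>
    simp only [List.foldl_cons, List.map_cons, PySem.Set.update_cons, pvStep]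
    by_cases h : d.contains kv.1 = true
    · rw [if_pos h, ih, PySem.Set.add_of_mem ((PySem.Dict.contains_iff_mem_keys d kv.1).mp h)]
    · rw [if_neg h, ih,
        PySem.Dict.keys_insert_of_not_contains d 1 (by simpa using h),
        PySem.Set.add_of_not_mem
          (fun hm => h ((PySem.Dict.contains_iff_mem_keys d kv.1).mpr hm))]

-- In a sorted list, 1 + the number of unequal adjacent pairs is the number of distinct elements.
theorem runs_sorted (l : List String) : ∀ (prev : String),
    (prev :: l).Pairwise (· ≤ ·) →
    1 + pvCountRuns prev l = ((prev :: l).toFinset.card : Int) := by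
  induction l with
  | nil => intro prev _; simp [pvCountRuns]
  | cons cur rest ih =>
    intro prev hp
    obtain ⟨hhead, hp'⟩ := List.pairwise_cons.mp hp
    by_cases h : cur = prev
    · subst h
      have hfin : (cur :: cur :: rest).toFinset = (cur :: rest).toFinset := by
        ext k; simp
      rw [hfin, ← ih cur hp']
      simp [pvCountRuns]
    · have hlt : prev < cur := lt_of_le_of_ne (hhead cur (by simp)) (Ne.symm h)
      have hnot : prev ∉ cur :: rest := by
        intro hm
        rcases List.mem_cons.mp hm with h1 | h2
        · exact absurd h1 (ne_of_lt hlt)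
        · exact absurd (lt_of_lt_of_le hlt ((List.pairwise_cons.mp hp').1 prev h2))
            (lt_irrefl prev)
      have hcard : (prev :: cur :: rest).toFinset.card = (cur :: rest).toFinset.card + 1 := by
        simp only [List.toFinset_cons]
        rw [Finset.card_insert_of_notMem (by simpa using hnot)]
      rw [show pvCountRuns prev (cur :: rest) = 1 + pvCountRuns cur rest from by
        simp [pvCountRuns, h]]
      have := ih cur hp'
      rw [hcard]
      push_cast
      omega

-- a nodup list with the same members as m has m.toFinset.card elements
theorem len_eq_card_of_mem_iff (s m : List String) (hnd : s.Nodup)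
    (hmem : ∀ k, k ∈ s ↔ k ∈ m) : s.length = m.toFinset.card := by
  rw [← List.toFinset_card_of_nodup hnd]
  congr 1
  ext k
  simp [hmem k]

-- ===== VERDICT (by name: the statement is the Claim_ definition above) =====
theorem get_unique_count_spec : Claim_equal_get_unique_count := by
  intro pos neg _
  unfold Spec_get_unique_count get_unique_count get_unique_count_alt
  show (((neg.foldl pvStep (pos.foldl pvStep PySem.Dict.empty)).keys.length : Int)) =
    (match PySem.List.sorted (pos.map Prod.fst ++ neg.map Prod.fst) (fun x => x) false with
     | [] => (0 : Int)
     | x :: rest => 1 + pvCountRuns x rest)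
  have h0 : (PySem.Dict.empty : PySem.Dict String Int).keys = ([] : List String) := rfl
  rw [keys_condLoop, keys_condLoop, h0]
  have hset : PySem.Set.update (PySem.Set.update [] (pos.map Prod.fst)) (neg.map Prod.fst)
      = PySem.Set.ofList (pos.map Prod.fst ++ neg.map Prod.fst) := by
    simp [PySem.Set.update, PySem.Set.ofList_eq_foldl, List.foldl_append]
  rw [hset]
  have hA : ((PySem.Set.ofList (pos.map Prod.fst ++ neg.map Prod.fst)).length : Int)
      = (((pos.map Prod.fst ++ neg.map Prod.fst).toFinset.card : Nat) : Int) := by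
    have hlen : (PySem.Set.ofList (pos.map Prod.fst ++ neg.map Prod.fst)).length
        = (pos.map Prod.fst ++ neg.map Prod.fst).toFinset.card :=
      len_eq_card_of_mem_iff _ (pos.map Prod.fst ++ neg.map Prod.fst)
        (PySem.Set.nodup_ofList _) (fun k => by simp [PySem.Set.mem_ofList])
    exact_mod_cast hlen
  have hperm : (PySem.List.sorted (pos.map Prod.fst ++ neg.map Prod.fst) (fun x => x) false).Perm
      (pos.map Prod.fst ++ neg.map Prod.fst) := PySem.List.sorted_perm _ _ _
  have hpw : (PySem.List.sorted (pos.map Prod.fst ++ neg.map Prod.fst) (fun x => x) false).Pairwise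
      (· ≤ ·) := by
    simpa using PySem.List.sorted_pairwise (xs := pos.map Prod.fst ++ neg.map Prod.fst)
      (key := fun x => x)
  have htf : (PySem.List.sorted (pos.map Prod.fst ++ neg.map Prod.fst) (fun x => x) false).toFinset
      = (pos.map Prod.fst ++ neg.map Prod.fst).toFinset := List.toFinset_eq_of_perm _ _ hperm
  cases hk : PySem.List.sorted (pos.map Prod.fst ++ neg.map Prod.fst) (fun x => x) false with
  | nil =>
    have hempty : pos.map Prod.fst ++ neg.map Prod.fst = [] := by
      have := hperm
      rw [hk] at this
      exact this.symm.eq_nil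
    rw [hA, hempty]
    simp
  | cons x rest =>
    rw [hk] at hpw htf
    rw [hA, ← htf]
    exact (runs_sorted rest x hpw).symm
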